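-- pv_equiv track=rewrite | github.com/jas7553/project-euler | problem_78.py | dopn
-- ===== SOURCE A (Python) =====
-- def dopn(num):
--     count = 2
--     banana = [num - 1, 1]
--     while banana[0] != 1 or banana[1] != 1:
--         if banana[1] == 2:
--             banana[1] = 1
--             count += 1
--         elif banana[0] == 2:
--             banana[0] = 1
--             count += 1
--         elif banana[0] > 1 and banana[1] == 1:
--             banana[0] -= 1
--             banana[1] = 2
--             count += 1
--     return count
-- ===== SOURCE B (Python) =====
-- def dopn(num):
--     # Closed form: the loop performs 2*num - 5 counted steps for num >= 3,
--     # and none for num == 2.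
--     return 2 if num == 2 else 2 * num - 3
-- ===== Notes on version B (the rewrite author's own statement) =====
-- stated objective: faster
-- what changed: Replaces the step-by-step two-cell state machine loop with a closed-form formula (2 if num==2 else 2*num-3).
-- outside the precondition, e.g. on dopn(1): A does not finish within the time limit, B returns -1
import Mathlib
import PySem

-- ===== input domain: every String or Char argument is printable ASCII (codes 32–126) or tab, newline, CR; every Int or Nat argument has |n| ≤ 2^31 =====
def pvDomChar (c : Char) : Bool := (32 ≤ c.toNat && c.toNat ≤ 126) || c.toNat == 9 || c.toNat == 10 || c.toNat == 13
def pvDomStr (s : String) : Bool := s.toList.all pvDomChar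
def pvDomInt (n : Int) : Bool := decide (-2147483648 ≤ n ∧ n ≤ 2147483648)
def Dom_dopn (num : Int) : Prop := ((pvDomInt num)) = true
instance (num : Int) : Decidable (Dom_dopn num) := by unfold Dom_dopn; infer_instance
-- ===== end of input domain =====

-- B replaces A's O(num) two-cell state-machine loop with the closed form 2 if num==2 else 2*num-3 (O(1)).

-- ===== PORT A =====
-- The Python while-loop, with fuel solely as a totality guard (the Python loop
-- never terminates for num ≤ 1; those inputs are outside Pre_dopn).
def dopnLoop : Nat → Int → Int → Int → Int
  | 0, _, _, count => count
  | fuel + 1, a, b, count =>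
    if a = 1 ∧ b = 1 then count
    else if b = 2 then dopnLoop fuel a 1 (count + 1)
    else if a = 2 then dopnLoop fuel 1 b (count + 1)
    else if a > 1 ∧ b = 1 then dopnLoop fuel (a - 1) 2 (count + 1)
    else count  -- Python loops forever here (unreachable for num ≥ 2)

def dopn (num : Int) : Int := dopnLoop (2 * num).toNat (num - 1) 1 2

-- ===== PORT B =====
def dopn_alt (num : Int) : Int := if num = 2 then 2 else 2 * num - 3

-- ===== PRECONDITION & SPEC =====
-- Pre_ excludes num ≤ 1, on which Python A loops forever (never returns).
def Pre_dopn (num : Int) : Prop := 2 ≤ num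
instance (num : Int) : Decidable (Pre_dopn num) := by unfold Pre_dopn; infer_instance
def pvWitness_dopn : Int := 5

def Spec_dopn (num : Int) (out : Int) : Prop := out = dopn_alt num
instance (num : Int) (out : Int) : Decidable (Spec_dopn num out) := by unfold Spec_dopn; infer_instance

-- ===== CLAIM (what is proved, stated in full; the proofs are below) =====
def Claim_equal_dopn : Prop := ∀ (num : Int), Dom_dopn num → Pre_dopn num → Spec_dopn num (dopn num)

-- ===== LEMMAS AND PROOFS =====

-- Loop characterization: from state (n+2, 1, c) with enough fuel the loop returns c + 2n + 1.
theorem dopnLoop_char (n : Nat) : ∀ (fuel : Nat) (c : Int), 2 * n + 1 ≤ fuel →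
    dopnLoop fuel ((n : Int) + 2) 1 c = c + 2 * n + 1 := by
  induction n with
  | zero =>
    intro fuel c h
    match fuel, h with
    | f + 1, _ =>
      simp only [dopnLoop]
      norm_num
      match f with
      | 0 => simp [dopnLoop]
      | g + 1 => simp [dopnLoop]
  | succ n ih =>
    intro fuel c h
    match fuel, h with
    | f + 1, h =>
      have hc1 : ((n + 1 : Nat) : Int) = (n : Int) + 1 := by push_cast; ring
      simp only [dopnLoop, hc1]
      split_ifs with h1 h2 h3 h4
      · exact absurd h1 (by omega)
      · exact absurd h2 (by norm_num)
      · exact absurd h3 (by omega)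
      · match f, (by omega : 1 ≤ f) with
        | g + 1, _ =>
          simp only [dopnLoop]
          split_ifs with k1
          · exact absurd k1 (by omega)
          · have he : (n : Int) + 1 + 2 - 1 = (n : Int) + 2 := by ring
            rw [he, ih g (c + 1 + 1) (by omega)]
            push_cast; ring
      · exact absurd (by exact ⟨by omega, by norm_num⟩) h4

-- ===== VERDICT (by name: the statement is the Claim_ definition above) =====
theorem dopn_spec : Claim_equal_dopn := by
  intro num _ hpre
  unfold Spec_dopn dopn dopn_alt
  by_cases h2 : num = 2
  · subst h2; decide
  · have h3 : 3 ≤ num := by unfold Pre_dopn at hpre; omega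
    rw [if_neg h2]
    obtain ⟨n, hn⟩ : ∃ n : Nat, num - 1 = (n : Int) + 2 :=
      ⟨(num - 3).toNat, by omega⟩
    have hfuel : 2 * (num - 3).toNat + 1 ≤ (2 * num).toNat := by omega
    have : num - 1 = ((num - 3).toNat : Int) + 2 := by omega
    rw [this, dopnLoop_char _ _ _ hfuel]
    omega
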